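-- pv_equiv track=rewrite | github.com/xMSEB/xMSEB | metrics/voxel_based_edge_density.py | map_edges_to_voxels
-- ===== SOURCE A (Python) =====
-- def bresenham_3d(start, end):
--     """Generates all voxels along a 3D line from start to end using Bresenham's algorithm."""
--     x1, y1, z1 = map(int, start)
--     x2, y2, z2 = map(int, end)
--
--     voxels = []
--
--     dx = abs(x2 - x1)
--     dy = abs(y2 - y1)
--     dz = abs(z2 - z1)
--
--     xs = 1 if x2 > x1 else -1
--     ys = 1 if y2 > y1 else -1
--     zs = 1 if z2 > z1 else -1
--
--     x, y, z = x1, y1, z1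
--
--     # Driving axis is X-axis
--     if dx >= dy and dx >= dz:
--         p1 = 2 * dy - dx
--         p2 = 2 * dz - dx
--         for _ in range(dx + 1):
--             voxels.append((x, y, z))
--             if p1 >= 0:
--                 y += ys
--                 p1 -= 2 * dx
--             if p2 >= 0:
--                 z += zs
--                 p2 -= 2 * dx
--             p1 += 2 * dy
--             p2 += 2 * dz
--             x += xs
--
--     # Driving axis is Y-axis
--     elif dy >= dx and dy >= dz:
--         p1 = 2 * dx - dy
--         p2 = 2 * dz - dy
--         for _ in range(dy + 1):
--             voxels.append((x, y, z))
--             if p1 >= 0: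
--                 x += xs
--                 p1 -= 2 * dy
--             if p2 >= 0:
--                 z += zs
--                 p2 -= 2 * dy
--             p1 += 2 * dx
--             p2 += 2 * dz
--             y += ys
--
--     # Driving axis is Z-axis
--     else:
--         p1 = 2 * dy - dz
--         p2 = 2 * dx - dz
--         for _ in range(dz + 1):
--             voxels.append((x, y, z))
--             if p1 >= 0:
--                 y += ys
--                 p1 -= 2 * dz
--             if p2 >= 0:
--                 x += xs
--                 p2 -= 2 * dz
--             p1 += 2 * dy
--             p2 += 2 * dx
--             z += zs
--
--     return voxels
--
-- def map_edges_to_voxels(nodes, edges, voxel_indices):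
--     """Maps edges to voxels, including all intermediate voxels along the edge path."""
--     voxel_edges = {}
--
--     for j, edge in enumerate(edges):
--         visited_voxels = set()
--         for i in range(1, len(edge)):
--             start_voxel = tuple(voxel_indices[edge[i - 1]])
--             end_voxel = tuple(voxel_indices[edge[i]])
--             traversed_voxels = bresenham_3d(start_voxel, end_voxel)
--
--             for voxel in traversed_voxels:
--                 if (voxel, j) not in visited_voxels:
--                     voxel_edges.setdefault(voxel, set()).add(j)
--                     visited_voxels.add((voxel, j))
--
--     return voxel_edges
-- ===== SOURCE B (Python) =====
-- def bresenham_3d(start, end):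
--     """Voxels along a 3D line, computed by closed-form Bresenham offsets."""
--     x1, y1, z1 = map(int, start)
--     x2, y2, z2 = map(int, end)
--     dx, dy, dz = abs(x2 - x1), abs(y2 - y1), abs(z2 - z1)
--     sx = 1 if x2 > x1 else -1
--     sy = 1 if y2 > y1 else -1
--     sz = 1 if z2 > z1 else -1
--     m = max(dx, dy, dz)
--     if m == 0:
--         return [(x1, y1, z1)]
--     return [(x1 + sx * ((2 * dx * i + m) // (2 * m)),
--              y1 + sy * ((2 * dy * i + m) // (2 * m)),
--              z1 + sz * ((2 * dz * i + m) // (2 * m)))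
--             for i in range(m + 1)]
--
-- def map_edges_to_voxels(nodes, edges, voxel_indices):
--     """Maps edges to voxels, including all intermediate voxels along the edge path."""
--     voxel_edges = {}
--     for j, edge in enumerate(edges):
--         for a, b in zip(edge, edge[1:]):
--             start_voxel = tuple(voxel_indices[a])
--             end_voxel = tuple(voxel_indices[b])
--             for voxel in bresenham_3d(start_voxel, end_voxel):
--                 voxel_edges.setdefault(voxel, set()).add(j)
--     return voxel_edges
-- ===== Notes on version B (the rewrite author's own statement) =====
-- stated objective: alternative
-- what changed: bresenham_3d computes each voxel directly by a closed-form floor-division offset ((2*d*i+m)//(2*m)) over the driving-axis index instead of accumulating Bresenham error terms with per-step conditional updates, and map_edges_to_voxels pairs consecutive nodes with zip and drops the redundant per-edge visited set (set.add is already idempotent).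
import Mathlib
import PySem

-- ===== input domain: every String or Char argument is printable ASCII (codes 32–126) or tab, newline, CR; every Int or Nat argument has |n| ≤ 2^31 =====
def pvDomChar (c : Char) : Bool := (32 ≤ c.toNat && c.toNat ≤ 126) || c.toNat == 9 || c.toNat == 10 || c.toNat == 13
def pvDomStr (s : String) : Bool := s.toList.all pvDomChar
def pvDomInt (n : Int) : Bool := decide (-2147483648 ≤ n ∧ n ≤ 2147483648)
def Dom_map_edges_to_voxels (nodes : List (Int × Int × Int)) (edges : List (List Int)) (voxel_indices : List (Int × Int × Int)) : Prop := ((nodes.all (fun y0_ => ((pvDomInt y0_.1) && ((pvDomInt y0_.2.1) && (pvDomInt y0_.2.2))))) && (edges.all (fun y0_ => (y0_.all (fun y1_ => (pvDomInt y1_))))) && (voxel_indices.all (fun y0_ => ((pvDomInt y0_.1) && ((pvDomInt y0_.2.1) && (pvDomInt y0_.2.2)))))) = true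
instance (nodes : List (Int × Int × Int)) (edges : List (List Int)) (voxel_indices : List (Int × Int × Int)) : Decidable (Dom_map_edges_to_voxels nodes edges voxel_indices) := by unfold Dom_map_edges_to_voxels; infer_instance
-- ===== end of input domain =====

-- B replaces A's incremental-error Bresenham by a closed-form floor-division offset per
-- driving-axis step (and drops A's redundant per-edge visited set); objective: alternative.

-- ===== PORT A =====
-- A's X-driving-axis loop: 'for _ in range(dx+1)' carrying (x, y, z, p1, p2), appending (x, y, z).
def bresLoopX (dx dy dz xs ys zs : Int) : Nat → Int → Int → Int → Int → Int → List (Int × Int × Int)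
  | 0, _, _, _, _, _ => []
  | n+1, x, y, z, p1, p2 =>
    (x, y, z) ::
      bresLoopX dx dy dz xs ys zs n (x + xs)
        (if p1 ≥ 0 then y + ys else y)
        (if p2 ≥ 0 then z + zs else z)
        ((if p1 ≥ 0 then p1 - 2*dx else p1) + 2*dy)
        ((if p2 ≥ 0 then p2 - 2*dx else p2) + 2*dz)

def bresLoopY (dx dy dz xs ys zs : Int) : Nat → Int → Int → Int → Int → Int → List (Int × Int × Int)
  | 0, _, _, _, _, _ => []
  | n+1, x, y, z, p1, p2 =>
    (x, y, z) ::
      bresLoopY dx dy dz xs ys zs n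
        (if p1 ≥ 0 then x + xs else x)
        (y + ys)
        (if p2 ≥ 0 then z + zs else z)
        ((if p1 ≥ 0 then p1 - 2*dy else p1) + 2*dx)
        ((if p2 ≥ 0 then p2 - 2*dy else p2) + 2*dz)

def bresLoopZ (dx dy dz xs ys zs : Int) : Nat → Int → Int → Int → Int → Int → List (Int × Int × Int)
  | 0, _, _, _, _, _ => []
  | n+1, x, y, z, p1, p2 =>
    (x, y, z) ::
      bresLoopZ dx dy dz xs ys zs n
        (if p2 ≥ 0 then x + xs else x)
        (if p1 ≥ 0 then y + ys else y)
        (z + zs)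
        ((if p1 ≥ 0 then p1 - 2*dz else p1) + 2*dy)
        ((if p2 ≥ 0 then p2 - 2*dz else p2) + 2*dx)

def bresenham_3d (start fin : Int × Int × Int) : List (Int × Int × Int) :=
  let x1 := start.1; let y1 := start.2.1; let z1 := start.2.2
  let x2 := fin.1; let y2 := fin.2.1; let z2 := fin.2.2
  let dx := |x2 - x1|
  let dy := |y2 - y1|
  let dz := |z2 - z1|
  let xs := if x2 > x1 then 1 else -1
  let ys := if y2 > y1 then 1 else -1
  let zs := if z2 > z1 then 1 else -1
  if dx ≥ dy ∧ dx ≥ dz then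
    bresLoopX dx dy dz xs ys zs (dx + 1).toNat x1 y1 z1 (2*dy - dx) (2*dz - dx)
  else if dy ≥ dx ∧ dy ≥ dz then
    bresLoopY dx dy dz xs ys zs (dy + 1).toNat x1 y1 z1 (2*dx - dy) (2*dz - dy)
  else
    bresLoopZ dx dy dz xs ys zs (dz + 1).toNat x1 y1 z1 (2*dy - dz) (2*dx - dz)

def map_edges_to_voxels (nodes : List (Int × Int × Int)) (edges : List (List Int)) (voxel_indices : List (Int × Int × Int)) : List (Int × Int × Int × List Int) :=
  let voxel_edges : PySem.Dict (Int × Int × Int) (PySem.Set Int) :=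
    (PySem.List.enumerate edges).foldl (fun d je =>
      let j := je.1
      let edge := je.2
      ((PySem.List.pyRange 1 (PySem.List.len edge) 1).foldl
        (fun (st : PySem.Dict (Int × Int × Int) (PySem.Set Int) × PySem.Set ((Int × Int × Int) × Int)) i =>
          let start_voxel := (PySem.List.pyGet? voxel_indices (PySem.List.pyGetD edge (i - 1) 0)).getD (0, 0, 0)
          let end_voxel := (PySem.List.pyGet? voxel_indices (PySem.List.pyGetD edge i 0)).getD (0, 0, 0)
          (bresenham_3d start_voxel end_voxel).foldl (fun st v =>
            if (v, j) ∈ st.2 then st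
            else (st.1.insert v (PySem.Set.add (st.1.getD v PySem.Set.empty) j),
                  PySem.Set.add st.2 (v, j))) st)
        (d, (PySem.Set.empty : PySem.Set ((Int × Int × Int) × Int)))).1)
      PySem.Dict.empty
  voxel_edges.items.map (fun p => (p.1.1, p.1.2.1, p.1.2.2, p.2))

-- ===== PORT B =====
-- B's bresenham: each voxel by the closed-form offset (2*d*i + m) // (2*m) along the range.
def bresenham_3d_alt (start fin : Int × Int × Int) : List (Int × Int × Int) :=
  let x1 := start.1; let y1 := start.2.1; let z1 := start.2.2
  let x2 := fin.1; let y2 := fin.2.1; let z2 := fin.2.2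
  let dx := |x2 - x1|
  let dy := |y2 - y1|
  let dz := |z2 - z1|
  let sx := if x2 > x1 then 1 else -1
  let sy := if y2 > y1 then 1 else -1
  let sz := if z2 > z1 then 1 else -1
  let m := max dx (max dy dz)
  if m = 0 then [(x1, y1, z1)]
  else (PySem.List.pyRange 0 (m + 1) 1).map (fun i =>
    (x1 + sx * PySem.Int.floordiv (2*dx*i + m) (2*m),
     y1 + sy * PySem.Int.floordiv (2*dy*i + m) (2*m),
     z1 + sz * PySem.Int.floordiv (2*dz*i + m) (2*m)))

def map_edges_to_voxels_alt (nodes : List (Int × Int × Int)) (edges : List (List Int)) (voxel_indices : List (Int × Int × Int)) : List (Int × Int × Int × List Int) :=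
  let voxel_edges : PySem.Dict (Int × Int × Int) (PySem.Set Int) :=
    (PySem.List.enumerate edges).foldl (fun d je =>
      let j := je.1
      let edge := je.2
      (edge.zip (PySem.List.slice edge (some 1) none)).foldl (fun d ab =>
        let start_voxel := (PySem.List.pyGet? voxel_indices ab.1).getD (0, 0, 0)
        let end_voxel := (PySem.List.pyGet? voxel_indices ab.2).getD (0, 0, 0)
        (bresenham_3d_alt start_voxel end_voxel).foldl (fun d v =>
          d.insert v (PySem.Set.add (d.getD v PySem.Set.empty) j)) d) d)
      PySem.Dict.empty
  voxel_edges.items.map (fun p => (p.1.1, p.1.2.1, p.1.2.2, p.2))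

-- ===== PRECONDITION & SPEC =====
-- Pre_ excludes exactly the inputs where A raises IndexError: an element of a traversed
-- edge (an edge of length ≥ 2) outside Python's index range of voxel_indices.
def Pre_map_edges_to_voxels (nodes : List (Int × Int × Int)) (edges : List (List Int)) (voxel_indices : List (Int × Int × Int)) : Prop :=
  ∀ e ∈ edges, 2 ≤ e.length → ∀ k ∈ e, PySem.Raise.InRange voxel_indices.length k
instance (nodes : List (Int × Int × Int)) (edges : List (List Int)) (voxel_indices : List (Int × Int × Int)) : Decidable (Pre_map_edges_to_voxels nodes edges voxel_indices) := by unfold Pre_map_edges_to_voxels; infer_instance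

def pvWitness_map_edges_to_voxels : (List (Int × Int × Int)) × List (List Int) × (List (Int × Int × Int)) :=
  ([], [[0, 1]], [(0, 0, 0), (3, 1, 0)])

def Spec_map_edges_to_voxels (nodes : List (Int × Int × Int)) (edges : List (List Int)) (voxel_indices : List (Int × Int × Int)) (out : List (Int × Int × Int × List Int)) : Prop := out = map_edges_to_voxels_alt nodes edges voxel_indices
instance (nodes : List (Int × Int × Int)) (edges : List (List Int)) (voxel_indices : List (Int × Int × Int)) (out : List (Int × Int × Int × List Int)) : Decidable (Spec_map_edges_to_voxels nodes edges voxel_indices out) := by unfold Spec_map_edges_to_voxels; infer_instance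

-- ===== CLAIM (what is proved, stated in full; the proofs are below) =====
def Claim_equal_map_edges_to_voxels : Prop := ∀ (nodes : List (Int × Int × Int)) (edges : List (List Int)) (voxel_indices : List (Int × Int × Int)), Dom_map_edges_to_voxels nodes edges voxel_indices → Pre_map_edges_to_voxels nodes edges voxel_indices → Spec_map_edges_to_voxels nodes edges voxel_indices (map_edges_to_voxels nodes edges voxel_indices)

-- ===== LEMMAS AND PROOFS =====
def bK (d m t : Int) : Int := (2*d*t + m) / (2*m)

lemma bK_zero (d m : Int) (hm : 0 < m) (hd : 0 ≤ d) : bK d m 0 = 0 := by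
  unfold bK
  have h : 2*d*0 + m = m := by ring
  rw [h]
  exact Int.ediv_eq_zero_of_lt (by omega) (by omega)

lemma bK_main (m t : Int) (hm : 0 < m) (ht : 0 ≤ t) : bK m m t = t := by
  unfold bK
  have h1 : 2*m*t + m = m + 2*m*t := by ring
  rw [h1, Int.add_mul_ediv_left _ _ (by omega : (2*m) ≠ 0)]
  rw [Int.ediv_eq_zero_of_lt (by omega) (by omega)]
  omega

lemma bK_succ (d m t : Int) (hm : 0 < m) (hd0 : 0 ≤ d) (hdm : d ≤ m) (ht : 0 ≤ t) :
    bK d m (t+1) = bK d m t + (if 0 ≤ 2*d*(t+1) - m - 2*m*(bK d m t) then 1 else 0) := by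
  unfold bK
  have hexp : 2*d*(t+1) = 2*d*t + 2*d := by ring
  set N := 2*d*t + m with hN
  have hq := Int.ediv_add_emod N (2*m)
  have hr0 : 0 ≤ N % (2*m) := Int.emod_nonneg N (by omega)
  have hr1 : N % (2*m) < 2*m := Int.emod_lt_of_pos N (by omega)
  set q := N / (2*m) with hqd
  set r := N % (2*m) with hrd
  have h2 : 2*d*(t+1) + m = (r + 2*d) + 2*m*q := by omega
  rw [h2, Int.add_mul_ediv_left _ _ (by omega : (2*m) ≠ 0)]
  have hcond : (0 ≤ 2*d*(t+1) - m - 2*m*q) ↔ 2*m ≤ r + 2*d := by omega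
  by_cases h : 2*m ≤ r + 2*d
  · have h3 : r + 2*d = (r + 2*d - 2*m) + 2*m*1 := by ring
    rw [h3, Int.add_mul_ediv_left _ _ (by omega : (2*m) ≠ 0),
        Int.ediv_eq_zero_of_lt (by omega) (by omega)]
    rw [if_pos (hcond.mpr h)]; omega
  · rw [Int.ediv_eq_zero_of_lt (by omega) (by omega), if_neg (by omega)]
    omega

lemma bresLoopX_eq (dx dy dz xs ys zs x1 y1 z1 : Int)
    (hdx : 0 < dx) (hy0 : 0 ≤ dy) (hy : dy ≤ dx) (hz0 : 0 ≤ dz) (hz : dz ≤ dx) :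
    ∀ (n : Nat) (t : Int), 0 ≤ t →
      bresLoopX dx dy dz xs ys zs n (x1 + xs*t)
        (y1 + ys * bK dy dx t) (z1 + zs * bK dz dx t)
        (2*dy*(t+1) - dx - 2*dx*(bK dy dx t))
        (2*dz*(t+1) - dx - 2*dx*(bK dz dx t))
      = (List.range n).map (fun (i : Nat) => (x1 + xs*(t+(i:Int)),
          y1 + ys * bK dy dx (t+(i:Int)), z1 + zs * bK dz dx (t+(i:Int)))) := by
  intro n
  induction n with
  | zero => intro t ht; simp [bresLoopX]
  | succ n ih =>
    intro t ht
    rw [List.range_succ_eq_map, List.map_cons]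
    rw [bresLoopX]
    have hy1 := bK_succ dy dx t hdx hy0 hy ht
    have hz1 := bK_succ dz dx t hdx hz0 hz ht
    have ihs := ih (t+1) (by omega)
    congr 1
    · norm_num
    have e1 : x1 + xs*t + xs = x1 + xs*(t+1) := by ring
    have e2 : (if 2*dy*(t+1) - dx - 2*dx*(bK dy dx t) ≥ 0 then y1 + ys * bK dy dx t + ys else y1 + ys * bK dy dx t) = y1 + ys * bK dy dx (t+1) := by
      split_ifs with h
      · rw [hy1, if_pos (by omega)]; ring
      · rw [hy1, if_neg (by omega)]; ring
    have e3 : (if 2*dz*(t+1) - dx - 2*dx*(bK dz dx t) ≥ 0 then z1 + zs * bK dz dx t + zs else z1 + zs * bK dz dx t) = z1 + zs * bK dz dx (t+1) := by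
      split_ifs with h
      · rw [hz1, if_pos (by omega)]; ring
      · rw [hz1, if_neg (by omega)]; ring
    have e4 : ((if 2*dy*(t+1) - dx - 2*dx*(bK dy dx t) ≥ 0 then 2*dy*(t+1) - dx - 2*dx*(bK dy dx t) - 2*dx else 2*dy*(t+1) - dx - 2*dx*(bK dy dx t)) + 2*dy) = 2*dy*(t+1+1) - dx - 2*dx*(bK dy dx (t+1)) := by
      split_ifs with h
      · rw [hy1, if_pos (by omega)]; ring
      · rw [hy1, if_neg (by omega)]; ring
    have e5 : ((if 2*dz*(t+1) - dx - 2*dx*(bK dz dx t) ≥ 0 then 2*dz*(t+1) - dx - 2*dx*(bK dz dx t) - 2*dx else 2*dz*(t+1) - dx - 2*dx*(bK dz dx t)) + 2*dz) = 2*dz*(t+1+1) - dx - 2*dx*(bK dz dx (t+1)) := by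
      split_ifs with h
      · rw [hz1, if_pos (by omega)]; ring
      · rw [hz1, if_neg (by omega)]; ring
    rw [e1, e2, e3, e4, e5, ihs, List.map_map]
    apply List.map_congr_left
    intro i _
    simp only [Function.comp]
    push_cast
    rw [show t + 1 + (i:Int) = t + ((i:Int) + 1) from by ring]

lemma bresLoopY_eq (dx dy dz xs ys zs x1 y1 z1 : Int)
    (hdy : 0 < dy) (hx0 : 0 ≤ dx) (hx : dx ≤ dy) (hz0 : 0 ≤ dz) (hz : dz ≤ dy) :
    ∀ (n : Nat) (t : Int), 0 ≤ t →
      bresLoopY dx dy dz xs ys zs n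
        (x1 + xs * bK dx dy t) (y1 + ys*t) (z1 + zs * bK dz dy t)
        (2*dx*(t+1) - dy - 2*dy*(bK dx dy t))
        (2*dz*(t+1) - dy - 2*dy*(bK dz dy t))
      = (List.range n).map (fun (i : Nat) => (x1 + xs * bK dx dy (t+(i:Int)),
          y1 + ys*(t+(i:Int)), z1 + zs * bK dz dy (t+(i:Int)))) := by
  intro n
  induction n with
  | zero => intro t ht; simp [bresLoopY]
  | succ n ih =>
    intro t ht
    rw [List.range_succ_eq_map, List.map_cons]
    rw [bresLoopY]
    have hy1 := bK_succ dx dy t hdy hx0 hx ht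
    have hz1 := bK_succ dz dy t hdy hz0 hz ht
    have ihs := ih (t+1) (by omega)
    congr 1
    · norm_num
    have e1 : y1 + ys*t + ys = y1 + ys*(t+1) := by ring
    have e2 : (if 2*dx*(t+1) - dy - 2*dy*(bK dx dy t) ≥ 0 then x1 + xs * bK dx dy t + xs else x1 + xs * bK dx dy t) = x1 + xs * bK dx dy (t+1) := by
      split_ifs with h
      · rw [hy1, if_pos (by omega)]; ring
      · rw [hy1, if_neg (by omega)]; ring
    have e3 : (if 2*dz*(t+1) - dy - 2*dy*(bK dz dy t) ≥ 0 then z1 + zs * bK dz dy t + zs else z1 + zs * bK dz dy t) = z1 + zs * bK dz dy (t+1) := by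
      split_ifs with h
      · rw [hz1, if_pos (by omega)]; ring
      · rw [hz1, if_neg (by omega)]; ring
    have e4 : ((if 2*dx*(t+1) - dy - 2*dy*(bK dx dy t) ≥ 0 then 2*dx*(t+1) - dy - 2*dy*(bK dx dy t) - 2*dy else 2*dx*(t+1) - dy - 2*dy*(bK dx dy t)) + 2*dx) = 2*dx*(t+1+1) - dy - 2*dy*(bK dx dy (t+1)) := by
      split_ifs with h
      · rw [hy1, if_pos (by omega)]; ring
      · rw [hy1, if_neg (by omega)]; ring
    have e5 : ((if 2*dz*(t+1) - dy - 2*dy*(bK dz dy t) ≥ 0 then 2*dz*(t+1) - dy - 2*dy*(bK dz dy t) - 2*dy else 2*dz*(t+1) - dy - 2*dy*(bK dz dy t)) + 2*dz) = 2*dz*(t+1+1) - dy - 2*dy*(bK dz dy (t+1)) := by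
      split_ifs with h
      · rw [hz1, if_pos (by omega)]; ring
      · rw [hz1, if_neg (by omega)]; ring
    rw [e1, e2, e3, e4, e5, ihs, List.map_map]
    apply List.map_congr_left
    intro i _
    simp only [Function.comp]
    push_cast
    rw [show t + 1 + (i:Int) = t + ((i:Int) + 1) from by ring]

lemma bresLoopZ_eq (dx dy dz xs ys zs x1 y1 z1 : Int)
    (hdz : 0 < dz) (hx0 : 0 ≤ dx) (hx : dx ≤ dz) (hy0 : 0 ≤ dy) (hy : dy ≤ dz) :
    ∀ (n : Nat) (t : Int), 0 ≤ t →
      bresLoopZ dx dy dz xs ys zs n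
        (x1 + xs * bK dx dz t) (y1 + ys * bK dy dz t) (z1 + zs*t)
        (2*dy*(t+1) - dz - 2*dz*(bK dy dz t))
        (2*dx*(t+1) - dz - 2*dz*(bK dx dz t))
      = (List.range n).map (fun (i : Nat) => (x1 + xs * bK dx dz (t+(i:Int)),
          y1 + ys * bK dy dz (t+(i:Int)), z1 + zs*(t+(i:Int)))) := by
  intro n
  induction n with
  | zero => intro t ht; simp [bresLoopZ]
  | succ n ih =>
    intro t ht
    rw [List.range_succ_eq_map, List.map_cons]
    rw [bresLoopZ]
    have hy1 := bK_succ dy dz t hdz hy0 hy ht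
    have hz1 := bK_succ dx dz t hdz hx0 hx ht
    have ihs := ih (t+1) (by omega)
    congr 1
    · norm_num
    have e1 : z1 + zs*t + zs = z1 + zs*(t+1) := by ring
    have e2 : (if 2*dy*(t+1) - dz - 2*dz*(bK dy dz t) ≥ 0 then y1 + ys * bK dy dz t + ys else y1 + ys * bK dy dz t) = y1 + ys * bK dy dz (t+1) := by
      split_ifs with h
      · rw [hy1, if_pos (by omega)]; ring
      · rw [hy1, if_neg (by omega)]; ring
    have e3 : (if 2*dx*(t+1) - dz - 2*dz*(bK dx dz t) ≥ 0 then x1 + xs * bK dx dz t + xs else x1 + xs * bK dx dz t) = x1 + xs * bK dx dz (t+1) := by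
      split_ifs with h
      · rw [hz1, if_pos (by omega)]; ring
      · rw [hz1, if_neg (by omega)]; ring
    have e4 : ((if 2*dy*(t+1) - dz - 2*dz*(bK dy dz t) ≥ 0 then 2*dy*(t+1) - dz - 2*dz*(bK dy dz t) - 2*dz else 2*dy*(t+1) - dz - 2*dz*(bK dy dz t)) + 2*dy) = 2*dy*(t+1+1) - dz - 2*dz*(bK dy dz (t+1)) := by
      split_ifs with h
      · rw [hy1, if_pos (by omega)]; ring
      · rw [hy1, if_neg (by omega)]; ring
    have e5 : ((if 2*dx*(t+1) - dz - 2*dz*(bK dx dz t) ≥ 0 then 2*dx*(t+1) - dz - 2*dz*(bK dx dz t) - 2*dz else 2*dx*(t+1) - dz - 2*dz*(bK dx dz t)) + 2*dx) = 2*dx*(t+1+1) - dz - 2*dz*(bK dx dz (t+1)) := by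
      split_ifs with h
      · rw [hz1, if_pos (by omega)]; ring
      · rw [hz1, if_neg (by omega)]; ring
    rw [e1, e2, e3, e4, e5, ihs, List.map_map]
    apply List.map_congr_left
    intro i _
    simp only [Function.comp]
    push_cast
    rw [show t + 1 + (i:Int) = t + ((i:Int) + 1) from by ring]

lemma bres_branches (dx dy dz xs ys zs x1 y1 z1 : Int) (hx : 0 ≤ dx) (hy : 0 ≤ dy) (hz : 0 ≤ dz) :
    (if dx ≥ dy ∧ dx ≥ dz then
      bresLoopX dx dy dz xs ys zs (dx + 1).toNat x1 y1 z1 (2*dy - dx) (2*dz - dx)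
    else if dy ≥ dx ∧ dy ≥ dz then
      bresLoopY dx dy dz xs ys zs (dy + 1).toNat x1 y1 z1 (2*dx - dy) (2*dz - dy)
    else
      bresLoopZ dx dy dz xs ys zs (dz + 1).toNat x1 y1 z1 (2*dy - dz) (2*dx - dz))
    = (if max dx (max dy dz) = 0 then [(x1, y1, z1)]
       else (PySem.List.pyRange 0 (max dx (max dy dz) + 1) 1).map (fun i =>
         (x1 + xs * PySem.Int.floordiv (2*dx*i + max dx (max dy dz)) (2*(max dx (max dy dz))),
          y1 + ys * PySem.Int.floordiv (2*dy*i + max dx (max dy dz)) (2*(max dx (max dy dz))),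
          z1 + zs * PySem.Int.floordiv (2*dz*i + max dx (max dy dz)) (2*(max dx (max dy dz)))))) := by
  by_cases h1 : dx ≥ dy ∧ dx ≥ dz
  · have hM : max dx (max dy dz) = dx := max_eq_left (max_le h1.1 h1.2)
    rw [if_pos h1, hM]
    by_cases h0 : dx = 0
    · have hy0 : dy = 0 := le_antisymm (h0 ▸ h1.1) hy
      have hz0 : dz = 0 := le_antisymm (h0 ▸ h1.2) hz
      subst h0 hy0 hz0
      norm_num [bresLoopX]
    · have hdx : 0 < dx := lt_of_le_of_ne hx (Ne.symm h0)
      rw [if_neg h0]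
      have h2 := bresLoopX_eq dx dy dz xs ys zs x1 y1 z1 hdx hy h1.1 hz h1.2 (dx + 1).toNat 0 le_rfl
      simp only [mul_zero, add_zero, zero_add, mul_one, sub_zero, bK_zero dy dx hdx hy,
        bK_zero dz dx hdx hz] at h2
      rw [h2, PySem.List.pyRange_one, List.map_map]
      simp only [sub_zero]
      apply List.map_congr_left
      intro k _
      simp only [Function.comp, zero_add]
      rw [PySem.Int.floordiv_eq_ediv_of_pos (by omega), PySem.Int.floordiv_eq_ediv_of_pos (by omega),
          PySem.Int.floordiv_eq_ediv_of_pos (by omega)]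
      have hm := bK_main dx (k : Int) hdx (by positivity)
      simp only [bK] at hm ⊢
      rw [hm]
  · rw [if_neg h1]
    by_cases h2 : dy ≥ dx ∧ dy ≥ dz
    · have hdy : 0 < dy := by omega
      have hM : max dx (max dy dz) = dy := by
        rw [max_eq_left h2.2, max_eq_right h2.1]
      rw [if_pos h2, hM, if_neg (by omega)]
      have h3 := bresLoopY_eq dx dy dz xs ys zs x1 y1 z1 hdy hx h2.1 hz h2.2 (dy + 1).toNat 0 le_rfl
      simp only [mul_zero, add_zero, zero_add, mul_one, sub_zero, bK_zero dx dy hdy hx,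
        bK_zero dz dy hdy hz] at h3
      rw [h3, PySem.List.pyRange_one, List.map_map]
      simp only [sub_zero]
      apply List.map_congr_left
      intro k _
      simp only [Function.comp, zero_add]
      rw [PySem.Int.floordiv_eq_ediv_of_pos (by omega), PySem.Int.floordiv_eq_ediv_of_pos (by omega),
          PySem.Int.floordiv_eq_ediv_of_pos (by omega)]
      have hm := bK_main dy (k : Int) hdy (by positivity)
      simp only [bK] at hm ⊢
      rw [hm]
    · have hdz : 0 < dz := by omega
      have hM : max dx (max dy dz) = dz := by
        have hzx : dx < dz := by omega
        have hzy : dy < dz := by omega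
        rw [max_eq_right (le_of_lt hzy), max_eq_right (le_of_lt hzx)]
      rw [if_neg h2, hM, if_neg (by omega)]
      have h3 := bresLoopZ_eq dx dy dz xs ys zs x1 y1 z1 hdz hx (by omega) hy (by omega) (dz + 1).toNat 0 le_rfl
      simp only [mul_zero, add_zero, zero_add, mul_one, sub_zero, bK_zero dx dz hdz hx,
        bK_zero dy dz hdz hy] at h3
      rw [h3, PySem.List.pyRange_one, List.map_map]
      simp only [sub_zero]
      apply List.map_congr_left
      intro k _
      simp only [Function.comp, zero_add]
      rw [PySem.Int.floordiv_eq_ediv_of_pos (by omega), PySem.Int.floordiv_eq_ediv_of_pos (by omega),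
          PySem.Int.floordiv_eq_ediv_of_pos (by omega)]
      have hm := bK_main dz (k : Int) hdz (by positivity)
      simp only [bK] at hm ⊢
      rw [hm]

lemma bres_eq (s e : Int × Int × Int) : bresenham_3d s e = bresenham_3d_alt s e := by
  simp only [bresenham_3d, bresenham_3d_alt]
  exact bres_branches _ _ _ _ _ _ _ _ _ (abs_nonneg _) (abs_nonneg _) (abs_nonneg _)
-- dict insert of the value already stored is the identity

lemma dict_insert_self {κ ν : Type} [BEq κ] [LawfulBEq κ] (d : PySem.Dict κ ν) (k : κ) (v : ν)
    (hnd : d.keys.Nodup) (h : d.get? k = some v) : d.insert k v = d := by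
  apply PySem.Dict.ext
  have hc : d.contains k = true := by
    rw [PySem.Dict.contains_eq_isSome_get?, h]; rfl
  rw [PySem.Dict.items_insert_of_contains d v hc]
  have : ∀ p ∈ d.items, (if p.1 == k then (k, v) else p) = p := by
    intro p hp
    obtain ⟨p1, p2⟩ := p
    by_cases hpk : p1 == k
    · have hk : p1 = k := eq_of_beq hpk
      subst hk
      have h2 := PySem.Dict.get?_of_mem_items d hp hnd
      rw [h2] at h
      have hv : p2 = v := Option.some.inj h
      rw [if_pos hpk, hv]
    · rw [if_neg hpk]
  rw [List.map_congr_left this, List.map_id']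

def vStepB (j : Int) (d : PySem.Dict (Int × Int × Int) (PySem.Set Int)) (v : Int × Int × Int) :
    PySem.Dict (Int × Int × Int) (PySem.Set Int) :=
  d.insert v (PySem.Set.add (d.getD v PySem.Set.empty) j)

def vStepA (j : Int)
    (st : PySem.Dict (Int × Int × Int) (PySem.Set Int) × PySem.Set ((Int × Int × Int) × Int))
    (v : Int × Int × Int) :
    PySem.Dict (Int × Int × Int) (PySem.Set Int) × PySem.Set ((Int × Int × Int) × Int) :=
  if (v, j) ∈ st.2 then st else (vStepB j st.1 v, PySem.Set.add st.2 (v, j))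

def vInv (j : Int) (d : PySem.Dict (Int × Int × Int) (PySem.Set Int))
    (vis : PySem.Set ((Int × Int × Int) × Int)) : Prop :=
  d.keys.Nodup ∧ ∀ v : Int × Int × Int, (v, j) ∈ vis → ∃ s, d.get? v = some s ∧ j ∈ s

lemma vStepB_preserves (j : Int) (d : _) (vis : _) (v : Int × Int × Int) (h : vInv j d vis) :
    vInv j (vStepB j d v) (PySem.Set.add vis (v, j)) := by
  obtain ⟨hnd, hinv⟩ := h
  constructor
  · exact PySem.Dict.nodup_keys_insert _ _ _ hnd
  · intro w hw
    rw [PySem.Set.mem_add] at hw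
    by_cases hwv : w = v
    · subst hwv
      refine ⟨PySem.Set.add (d.getD w PySem.Set.empty) j, ?_, ?_⟩
      · exact PySem.Dict.get?_insert_self _ _ _
      · rw [PySem.Set.mem_add]; right; rfl
    · rcases hw with hw | hw
      · obtain ⟨s, hs, hjs⟩ := hinv w hw
        exact ⟨s, by unfold vStepB; rw [PySem.Dict.get?_insert_of_ne d _ hwv, hs], hjs⟩
      · exact absurd (Prod.ext_iff.mp hw).1 hwv

lemma voxfold_eq (j : Int) (vs : List (Int × Int × Int)) : ∀ d vis, vInv j d vis →
    (vs.foldl (vStepA j) (d, vis)).1 = vs.foldl (vStepB j) d ∧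
      vInv j (vs.foldl (vStepA j) (d, vis)).1 (vs.foldl (vStepA j) (d, vis)).2 := by
  induction vs with
  | nil => intro d vis h; exact ⟨rfl, h⟩
  | cons v vs ih =>
    intro d vis h
    simp only [List.foldl_cons]
    by_cases hmem : (v, j) ∈ vis
    · have hA : vStepA j (d, vis) v = (d, vis) := by
        unfold vStepA; rw [if_pos hmem]
      have hB : vStepB j d v = d := by
        obtain ⟨s, hs, hjs⟩ := h.2 v hmem
        unfold vStepB
        rw [PySem.Dict.getD_of_get?_eq_some d PySem.Set.empty hs, PySem.Set.add_of_mem hjs]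
        exact dict_insert_self d v s h.1 hs
      rw [hA, hB]
      exact ih d vis h
    · have hA : vStepA j (d, vis) v = (vStepB j d v, PySem.Set.add vis (v, j)) := by
        unfold vStepA; rw [if_neg hmem]
      rw [hA]
      exact ih _ _ (vStepB_preserves j d vis v h)

lemma segfold_eq {γ : Type} (j : Int) (h : γ → List (Int × Int × Int)) (L : List γ) :
    ∀ d vis, vInv j d vis →
    ((L.foldl (fun st ab => (h ab).foldl (vStepA j) st) (d, vis)).1
      = L.foldl (fun d ab => (h ab).foldl (vStepB j) d) d) ∧
    vInv j (L.foldl (fun st ab => (h ab).foldl (vStepA j) st) (d, vis)).1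
      (L.foldl (fun st ab => (h ab).foldl (vStepA j) st) (d, vis)).2 := by
  induction L with
  | nil => intro d vis hI; exact ⟨rfl, hI⟩
  | cons ab L ih =>
    intro d vis hI
    simp only [List.foldl_cons]
    obtain ⟨h1, h2⟩ := voxfold_eq j (h ab) d vis hI
    obtain ⟨s1, s2⟩ : ((h ab).foldl (vStepA j) (d, vis)) = (((h ab).foldl (vStepA j) (d, vis)).1, ((h ab).foldl (vStepA j) (d, vis)).2) := rfl
    rw [show ((h ab).foldl (vStepA j) (d, vis)) = (((h ab).foldl (vStepA j) (d, vis)).1, ((h ab).foldl (vStepA j) (d, vis)).2) from rfl]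
    rw [h1]
    exact ih _ _ (h1 ▸ h2)

lemma range_adj_foldl {σ : Type} (f : σ → Int × Int → σ) :
    ∀ (edge : List Int) (s : σ),
    (List.range (edge.length - 1)).foldl (fun st k => f st (edge.getD k 0, edge.getD (k+1) 0)) s
    = (edge.zip edge.tail).foldl f s := by
  intro edge
  induction edge with
  | nil => intro s; simp
  | cons a t ih =>
    intro s
    cases t with
    | nil => simp
    | cons b t' =>
      have hlen : (a :: b :: t').length - 1 = ((b :: t').length - 1) + 1 := by
        simp
      rw [hlen, List.range_succ_eq_map]
      simp only [List.foldl_cons, List.foldl_map, List.getD_cons_zero, List.getD_cons_succ,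
        List.zip_cons_cons, List.tail_cons]
      exact ih (f s (a, b))

lemma adj_pairs_foldl {σ : Type} (edge : List Int) (f : σ → Int × Int → σ) (s : σ) :
    (PySem.List.pyRange 1 (PySem.List.len edge) 1).foldl
      (fun st i => f st (PySem.List.pyGetD edge (i-1) 0, PySem.List.pyGetD edge i 0)) s
    = (edge.zip (PySem.List.slice edge (some 1) none)).foldl f s := by
  rw [PySem.List.slice_from_one, PySem.List.len_eq, PySem.List.pyRange_one, List.foldl_map]
  have hn : (((edge.length : Int)) - 1).toNat = edge.length - 1 := by omega
  rw [hn]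
  rw [PySem.List.foldl_congr_mem _ _
    (fun st (k : Nat) => f st (edge.getD k 0, edge.getD (k+1) 0)) s ?_]
  · exact range_adj_foldl f edge s
  · intro acc k _
    have e1 : 1 + (k : Int) - 1 = ((k : Nat) : Int) := by ring
    have e2 : 1 + (k : Int) = (((k+1) : Nat) : Int) := by push_cast; ring
    rw [e1, e2, PySem.List.pyGetD_natCast, PySem.List.pyGetD_natCast]

def gv (vox : List (Int × Int × Int)) (a : Int) : Int × Int × Int :=
  (PySem.List.pyGet? vox a).getD (0, 0, 0)

lemma outer_fold (vox : List (Int × Int × Int)) :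
    ∀ (l : List (Int × List Int)) (d : PySem.Dict (Int × Int × Int) (PySem.Set Int)), d.keys.Nodup →
    (l.foldl (fun d je =>
        ((je.2.zip (PySem.List.slice je.2 (some 1) none)).foldl
          (fun st ab => (bresenham_3d (gv vox ab.1) (gv vox ab.2)).foldl (vStepA je.1) st)
          (d, PySem.Set.empty)).1) d
      = l.foldl (fun d je =>
        (je.2.zip (PySem.List.slice je.2 (some 1) none)).foldl
          (fun d ab => (bresenham_3d (gv vox ab.1) (gv vox ab.2)).foldl (vStepB je.1) d) d) d)
    ∧ (l.foldl (fun d je =>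
        (je.2.zip (PySem.List.slice je.2 (some 1) none)).foldl
          (fun d ab => (bresenham_3d (gv vox ab.1) (gv vox ab.2)).foldl (vStepB je.1) d) d) d).keys.Nodup := by
  intro l
  induction l with
  | nil => intro d h; exact ⟨rfl, h⟩
  | cons je l ih =>
    intro d h
    simp only [List.foldl_cons]
    have hI : vInv je.1 d PySem.Set.empty := by
      refine ⟨h, ?_⟩
      intro v hv
      simp [PySem.Set.empty] at hv
    obtain ⟨h1, h2⟩ := segfold_eq je.1 (fun ab => bresenham_3d (gv vox ab.1) (gv vox ab.2))
      (je.2.zip (PySem.List.slice je.2 (some 1) none)) d PySem.Set.empty hI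
    rw [h1]
    exact ih _ (h1 ▸ h2.1)

theorem ports_eq (nodes : List (Int × Int × Int)) (edges : List (List Int)) (voxel_indices : List (Int × Int × Int)) :
    map_edges_to_voxels nodes edges voxel_indices = map_edges_to_voxels_alt nodes edges voxel_indices := by
  unfold map_edges_to_voxels map_edges_to_voxels_alt
  have hb : bresenham_3d_alt = bresenham_3d :=
    funext fun s => funext fun e => (bres_eq s e).symm
  rw [hb]
  refine congrArg (fun d : PySem.Dict (Int × Int × Int) (PySem.Set Int) =>
    d.items.map (fun p => (p.1.1, p.1.2.1, p.1.2.2, p.2))) ?_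
  have hstep : ∀ (d : PySem.Dict (Int × Int × Int) (PySem.Set Int)) (je : Int × List Int),
      ((PySem.List.pyRange 1 (PySem.List.len je.2) 1).foldl
        (fun (st : PySem.Dict (Int × Int × Int) (PySem.Set Int) × PySem.Set ((Int × Int × Int) × Int)) i =>
          (bresenham_3d (gv voxel_indices (PySem.List.pyGetD je.2 (i - 1) 0))
            (gv voxel_indices (PySem.List.pyGetD je.2 i 0))).foldl (vStepA je.1) st)
        (d, PySem.Set.empty)).1
      = ((je.2.zip (PySem.List.slice je.2 (some 1) none)).foldl
          (fun st ab => (bresenham_3d (gv voxel_indices ab.1) (gv voxel_indices ab.2)).foldl (vStepA je.1) st)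
          (d, PySem.Set.empty)).1 := by
    intro d je
    exact congrArg Prod.fst (adj_pairs_foldl je.2
      (fun st ab => (bresenham_3d (gv voxel_indices ab.1) (gv voxel_indices ab.2)).foldl (vStepA je.1) st)
      (d, PySem.Set.empty))
  calc (PySem.List.enumerate edges).foldl (fun d je =>
        ((PySem.List.pyRange 1 (PySem.List.len je.2) 1).foldl
          (fun (st : PySem.Dict (Int × Int × Int) (PySem.Set Int) × PySem.Set ((Int × Int × Int) × Int)) i =>
            (bresenham_3d (gv voxel_indices (PySem.List.pyGetD je.2 (i - 1) 0))
              (gv voxel_indices (PySem.List.pyGetD je.2 i 0))).foldl (vStepA je.1) st)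
          (d, PySem.Set.empty)).1) PySem.Dict.empty
      = (PySem.List.enumerate edges).foldl (fun d je =>
        ((je.2.zip (PySem.List.slice je.2 (some 1) none)).foldl
          (fun st ab => (bresenham_3d (gv voxel_indices ab.1) (gv voxel_indices ab.2)).foldl (vStepA je.1) st)
          (d, PySem.Set.empty)).1) PySem.Dict.empty := by
        exact PySem.List.foldl_congr_mem _ _ _ _ (fun acc x _ => hstep acc x)
    _ = (PySem.List.enumerate edges).foldl (fun d je =>
        (je.2.zip (PySem.List.slice je.2 (some 1) none)).foldl
          (fun d ab => (bresenham_3d (gv voxel_indices ab.1) (gv voxel_indices ab.2)).foldl (vStepB je.1) d) d) PySem.Dict.empty := by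
        exact (outer_fold voxel_indices (PySem.List.enumerate edges) PySem.Dict.empty PySem.Dict.nodup_keys_empty).1

-- ===== VERDICT (by name: the statement is the Claim_ definition above) =====
theorem map_edges_to_voxels_spec : Claim_equal_map_edges_to_voxels := by
  intro nodes edges voxel_indices _hdom _hpre
  unfold Spec_map_edges_to_voxels
  exact ports_eq nodes edges voxel_indices
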